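-- pv_equiv track=rewrite | github.com/veerendra-poosala/ccbpCodes | ccbp_codes/coding_practice_30/FindMaxMinSumOfMxNMatrix.py | find_max_min_sum
-- ===== SOURCE A (Python) =====
-- def find_max_min_sum(num_list):
--     new_list = []
--     for i in range(len(num_list)):
--         for j in range(len(num_list[i])):
--             new_list.append(num_list[i][j])
--
--     new_list.sort()
--     min_value = min(new_list)
--     max_value = max(new_list)
--     sum_value = sum(new_list)
--
--     return max_value,min_value,sum_value
-- ===== SOURCE B (Python) =====
-- def find_max_min_sum(num_list):
--     max_value = None
--     min_value = None
--     sum_value = 0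
--     for row in num_list:
--         for x in row:
--             if max_value is None or x > max_value:
--                 max_value = x
--             if min_value is None or x < min_value:
--                 min_value = x
--             sum_value += x
--     if max_value is None:
--         raise ValueError("empty matrix")
--     return max_value, min_value, sum_value
-- ===== Notes on version B (the rewrite author's own statement) =====
-- stated objective: faster
-- what changed: B makes one combined pass keeping running max/min/sum accumulators instead of building a flattened copy, sorting it, and scanning it three more times with min/max/sum.
import Mathlib
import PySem

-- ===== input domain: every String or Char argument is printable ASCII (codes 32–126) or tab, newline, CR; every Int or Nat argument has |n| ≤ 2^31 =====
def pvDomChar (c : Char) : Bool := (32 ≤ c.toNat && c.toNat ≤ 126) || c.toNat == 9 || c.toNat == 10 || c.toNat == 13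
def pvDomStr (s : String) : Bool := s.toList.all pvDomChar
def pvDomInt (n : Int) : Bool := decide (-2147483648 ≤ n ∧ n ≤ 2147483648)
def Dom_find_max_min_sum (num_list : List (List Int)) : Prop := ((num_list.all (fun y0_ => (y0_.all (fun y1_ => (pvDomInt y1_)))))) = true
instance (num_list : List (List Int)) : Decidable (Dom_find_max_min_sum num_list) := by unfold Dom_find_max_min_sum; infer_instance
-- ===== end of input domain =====

-- B replaces A's flatten-copy + sort + three scans (min/max/sum) by a single pass with
-- running max/min/sum accumulators (objective: faster, O(n) vs O(n log n)).


-- ===== PORT A =====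
def find_max_min_sum (num_list : List (List Int)) : Int × Int × Int :=
  let new_list := (PySem.List.pyRange 0 num_list.length 1).foldl
    (fun acc i => (PySem.List.pyRange 0 (PySem.List.pyGetD num_list i []).length 1).foldl
      (fun acc2 j => acc2 ++ [PySem.List.pyGetD (PySem.List.pyGetD num_list i []) j 0]) acc) []
  let sorted_list := PySem.List.sorted new_list (fun x => x) false
  -- min([]) / max([]) raise ValueError in Python: none here, excluded by Pre_
  let min_value := (PySem.List.min? sorted_list (fun x => x)).getD 0
  let max_value := (PySem.List.max? sorted_list (fun x => x)).getD 0
  let sum_value := sorted_list.sum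
  (max_value, min_value, sum_value)

-- ===== PORT B =====
-- one element of the single pass: update running max, running min, running sum
def pvStep (st : Option Int × Option Int × Int) (x : Int) : Option Int × Option Int × Int :=
  let mx := match st.1 with
    | none => some x
    | some m => if x > m then some x else some m
  let mn := match st.2.1 with
    | none => some x
    | some m => if x < m then some x else some m
  (mx, mn, st.2.2 + x)

def find_max_min_sum_alt (num_list : List (List Int)) : Int × Int × Int :=
  let st := num_list.foldl (fun acc row => row.foldl pvStep acc) (none, none, 0)
  match st with
  | (some mx, some mn, s) => (mx, mn, s)
  | _ => (0, 0, 0)   -- Python B raises ValueError here (empty matrix); excluded by Pre_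

-- ===== PRECONDITION & SPEC =====
-- Pre_ excludes matrices with no elements (empty, or all rows empty): there Python A raises
-- ValueError from min([]) (and Python B raises ValueError too).
def Pre_find_max_min_sum (num_list : List (List Int)) : Prop := num_list.flatten ≠ []
instance (num_list : List (List Int)) : Decidable (Pre_find_max_min_sum num_list) := by unfold Pre_find_max_min_sum; infer_instance
def pvWitness_find_max_min_sum : List (List Int) := [[3, 1], [], [2]]

def Spec_find_max_min_sum (num_list : List (List Int)) (out : Int × Int × Int) : Prop := out = find_max_min_sum_alt num_list
instance (num_list : List (List Int)) (out : Int × Int × Int) : Decidable (Spec_find_max_min_sum num_list out) := by unfold Spec_find_max_min_sum; infer_instance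

-- ===== CLAIM (what is proved, stated in full; the proofs are below) =====
def Claim_equal_find_max_min_sum : Prop := ∀ (num_list : List (List Int)), Dom_find_max_min_sum num_list → Pre_find_max_min_sum num_list → Spec_find_max_min_sum num_list (find_max_min_sum num_list)

-- ===== LEMMAS AND PROOFS =====

-- A's index-loop flatten equals List.flatten
theorem pvRowLoop (r acc : List Int) :
    (PySem.List.pyRange 0 (r.length : Int) 1).foldl
      (fun acc2 j => acc2 ++ [PySem.List.pyGetD r j 0]) acc = acc ++ r := by
  rw [PySem.List.foldl_pyRange_zero_pyGetD' r 0 (fun a x => a ++ [x]) acc,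
      PySem.List.foldl_append_singleton]

theorem pvRowsLoop (t : List (List Int)) (acc : List Int) :
    t.foldl (fun acc row => (PySem.List.pyRange 0 (row.length : Int) 1).foldl
        (fun acc2 j => acc2 ++ [PySem.List.pyGetD row j 0]) acc) acc
      = acc ++ t.flatten := by
  induction t generalizing acc with
  | nil => simp
  | cons r t2 ih =>
      rw [List.foldl_cons, pvRowLoop, ih, List.append_assoc, List.flatten_cons]

-- A's index-loop flatten equals List.flatten
theorem pvA_newlist (num_list : List (List Int)) :
    (PySem.List.pyRange 0 num_list.length 1).foldl
      (fun acc i => (PySem.List.pyRange 0 (PySem.List.pyGetD num_list i []).length 1).foldl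
        (fun acc2 j => acc2 ++ [PySem.List.pyGetD (PySem.List.pyGetD num_list i []) j 0]) acc) []
    = num_list.flatten := by
  rw [PySem.List.foldl_pyRange_zero_pyGetD' num_list []
      (fun acc row => (PySem.List.pyRange 0 row.length 1).foldl
        (fun acc2 j => acc2 ++ [PySem.List.pyGetD row j 0]) acc) []]
  simpa using pvRowsLoop num_list []

theorem pvStep_some (m n s x : Int) :
    pvStep (some m, some n, s) x = (some (max m x), some (min n x), s + x) := by
  simp only [pvStep, max_def, min_def]
  split_ifs <;> simp_all <;> omega

theorem pvStep_fold (xs : List Int) (m n s : Int) :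
    xs.foldl pvStep (some m, some n, s) = (some (xs.foldl max m), some (xs.foldl min n), s + xs.sum) := by
  induction xs generalizing m n s with
  | nil => simp
  | cons x t ih =>
      simp only [List.foldl_cons, pvStep_some, ih, List.sum_cons]
      simp [add_assoc]

theorem pvB_eq (num_list : List (List Int)) (x : Int) (xs : List Int)
    (h : num_list.flatten = x :: xs) :
    find_max_min_sum_alt num_list = (xs.foldl max x, xs.foldl min x, x + xs.sum) := by
  unfold find_max_min_sum_alt
  rw [← List.foldl_flatten, h]
  simp only [List.foldl_cons]
  have : pvStep (none, none, 0) x = (some x, some x, x) := by simp [pvStep]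
  rw [this, pvStep_fold]

-- ===== VERDICT (by name: the statement is the Claim_ definition above) =====
theorem find_max_min_sum_spec : Claim_equal_find_max_min_sum := by
  intro num_list _ hpre
  unfold Spec_find_max_min_sum
  obtain ⟨x, xs, h⟩ : ∃ x xs, num_list.flatten = x :: xs := by
    cases hF : num_list.flatten with
    | nil => exact absurd hF hpre
    | cons a t => exact ⟨a, t, rfl⟩
  rw [pvB_eq num_list x xs h]
  unfold find_max_min_sum
  rw [pvA_newlist, h]
  have hperm : (PySem.List.sorted (x :: xs) (fun x => x) false).Perm (x :: xs) :=
    PySem.List.sorted_perm _ _ _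
  -- sorted list is nonempty
  cases hs : PySem.List.sorted (x :: xs) (fun x => x) false with
  | nil => exact absurd (List.Perm.symm (hs ▸ hperm)).eq_nil (by simp)
  | cons m t =>
      rw [hs] at hperm
      have hsum : (m :: t).sum = x + xs.sum := by
        simpa using hperm.sum_eq
      have hmin : (PySem.List.min? (m :: t) (fun x => x)).getD 0 = xs.foldl min x := by
        rw [PySem.List.min?_id_cons]
        have h1 : ∀ y ∈ x :: xs, t.foldl min m ≤ y := by
          intro y hy
          exact PySem.List.min?_isMin (PySem.List.min?_id_cons m t) y (hperm.mem_iff.mpr hy)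
        have h2 : t.foldl min m ∈ x :: xs := by
          refine hperm.mem_iff.mp ?_
          rcases PySem.List.foldl_min_mem t m with h | h
          · simp [h]
          · simp [h]
        have h3 : xs.foldl min x ∈ x :: xs := by
          rcases PySem.List.foldl_min_mem xs x with h | h <;> simp [h]
        have h4 := (PySem.List.foldl_min_le xs x)
        have h5 : ∀ y ∈ x :: xs, xs.foldl min x ≤ y := by
          intro y hy
          rcases List.mem_cons.mp hy with rfl | hy
          · exact h4.1
          · exact h4.2 y hy
        simp only [Option.getD_some]
        exact le_antisymm (h1 _ h3) (h5 _ h2)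
      have hmax : (PySem.List.max? (m :: t) (fun x => x)).getD 0 = xs.foldl max x := by
        rw [PySem.List.max?_id_cons]
        have h1 : ∀ y ∈ x :: xs, y ≤ t.foldl max m := by
          intro y hy
          exact PySem.List.max?_isMax (PySem.List.max?_id_cons m t) y (hperm.mem_iff.mpr hy)
        have h2 : t.foldl max m ∈ x :: xs := by
          refine hperm.mem_iff.mp ?_
          rcases PySem.List.foldl_max_mem t m with h | h
          · simp [h]
          · simp [h]
        have h3 : xs.foldl max x ∈ x :: xs := by
          rcases PySem.List.foldl_max_mem xs x with h | h <;> simp [h]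
        have h4 := (PySem.List.le_foldl_max xs x)
        have h5 : ∀ y ∈ x :: xs, y ≤ xs.foldl max x := by
          intro y hy
          rcases List.mem_cons.mp hy with rfl | hy
          · exact h4.1
          · exact h4.2 y hy
        simp only [Option.getD_some]
        exact le_antisymm (h5 _ h2) (h1 _ h3)
      simp only [hs]
      exact Prod.ext hmax (Prod.ext hmin hsum)
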